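-- pv_equiv track=rewrite | github.com/songlab-cal/phylogpn | src/embedders.py | _get_seq_chunks
-- ===== SOURCE A (Python) =====
-- def _get_seq_chunks(seq, chunk_size: int = 1, context_size: int = 1):
--     seq_length = len(seq)
--
--     for start_idx in range(0, len(seq), chunk_size):
--         stop_idx = min(start_idx + chunk_size, seq_length)
--         start_idx = start_idx - context_size // 2
--         stop_idx = stop_idx + context_size // 2
--
--         left_padding = right_padding = ""
--
--         if start_idx < 0:
--             left_padding = "N" * -start_idx
--             start_idx = 0
--
--         if stop_idx > seq_length:
--             right_padding = "N" * (stop_idx - seq_length)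
--             stop_idx = seq_length
--
--         yield left_padding + seq[start_idx:stop_idx] + right_padding
-- ===== SOURCE B (Python) =====
-- def _get_seq_chunks(seq, chunk_size: int = 1, context_size: int = 1):
--     pad = context_size // 2
--     n = len(seq)
--     starts = range(0, n, chunk_size)
--     if starts:
--         padded = "N" * pad + seq + "N" * pad
--         for start_idx in starts:
--             yield padded[start_idx : min(start_idx + chunk_size, n) + 2 * pad]
-- ===== Notes on version B (the rewrite author's own statement) =====
-- stated objective: simpler
-- what changed: B builds the N-padded sequence once before the loop and yields each chunk as a single clamped slice of it, eliminating A's per-chunk boundary branches and padding-string construction.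
-- outside the precondition, e.g. on _get_seq_chunks('abcd', 3, -2): A returns ['b', ''], B returns ['a', '']
import Mathlib
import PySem

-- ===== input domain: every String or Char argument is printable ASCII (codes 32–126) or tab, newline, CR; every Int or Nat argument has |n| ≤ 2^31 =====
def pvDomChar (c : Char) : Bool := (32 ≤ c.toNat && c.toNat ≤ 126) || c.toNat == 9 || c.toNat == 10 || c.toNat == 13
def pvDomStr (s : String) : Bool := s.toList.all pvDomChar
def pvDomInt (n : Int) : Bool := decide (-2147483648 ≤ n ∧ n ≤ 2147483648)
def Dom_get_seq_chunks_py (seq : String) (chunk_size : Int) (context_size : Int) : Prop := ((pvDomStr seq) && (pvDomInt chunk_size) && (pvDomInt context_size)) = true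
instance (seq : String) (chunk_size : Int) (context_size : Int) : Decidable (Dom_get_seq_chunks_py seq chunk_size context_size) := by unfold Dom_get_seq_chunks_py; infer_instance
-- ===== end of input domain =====

-- B builds the N-padded sequence once and yields each chunk as a single clamped slice,
-- eliminating A's per-chunk boundary branches (objective: simpler; equivalence is about the generator's yielded list).


-- ===== PORT A =====
def get_seq_chunks_py (seq : String) (chunk_size : Int) (context_size : Int) : List String :=
  let s := seq.toList
  let seq_length : Int := PySem.List.len s
  (PySem.List.pyRange 0 (PySem.List.len s) chunk_size).map (fun start_idx0 =>
    let stop_idx0 := min (start_idx0 + chunk_size) seq_length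
    let start_idx1 := start_idx0 - PySem.Int.floordiv context_size 2
    let stop_idx1 := stop_idx0 + PySem.Int.floordiv context_size 2
    let left_padding : List Char := if start_idx1 < 0 then PySem.List.pyRepeat ['N'] (-start_idx1) else []
    let start_idx2 := if start_idx1 < 0 then 0 else start_idx1
    let right_padding : List Char := if seq_length < stop_idx1 then PySem.List.pyRepeat ['N'] (stop_idx1 - seq_length) else []
    let stop_idx2 := if seq_length < stop_idx1 then seq_length else stop_idx1
    String.ofList (left_padding ++ PySem.List.slice s (some start_idx2) (some stop_idx2) ++ right_padding))

-- ===== PORT B =====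
def get_seq_chunks_py_alt (seq : String) (chunk_size : Int) (context_size : Int) : List String :=
  let pad := PySem.Int.floordiv context_size 2
  let s := seq.toList
  let n : Int := PySem.List.len s
  let starts := PySem.List.pyRange 0 n chunk_size
  if starts.isEmpty then []
  else
    let padded := PySem.List.pyRepeat ['N'] pad ++ s ++ PySem.List.pyRepeat ['N'] pad
    starts.map (fun start_idx =>
      String.ofList (PySem.List.slice padded (some start_idx) (some (min (start_idx + chunk_size) n + 2 * pad))))

-- ===== PRECONDITION & SPEC =====
-- Pre_ excludes chunk_size = 0, on which A raises ValueError (range step 0), and negative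
-- context_size — a nonsensical count outside the function's natural domain — on the inputs where
-- it matters (positive chunk_size and a nonempty sequence): there A's character-trimming output is
-- an accident of its arithmetic; with a negative chunk_size or an empty sequence no chunk is
-- produced at all, so those inputs stay inside Pre_ for every context_size.
def Pre_get_seq_chunks_py (seq : String) (chunk_size : Int) (context_size : Int) : Prop :=
  chunk_size ≠ 0 ∧ (0 ≤ context_size ∨ chunk_size < 0 ∨ seq = "")
instance (seq : String) (chunk_size : Int) (context_size : Int) : Decidable (Pre_get_seq_chunks_py seq chunk_size context_size) := by unfold Pre_get_seq_chunks_py; infer_instance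

def pvWitness_get_seq_chunks_py : String × Int × Int := ("ACGT", 2, 3)

def Spec_get_seq_chunks_py (seq : String) (chunk_size : Int) (context_size : Int) (out : List String) : Prop := out = get_seq_chunks_py_alt seq chunk_size context_size
instance (seq : String) (chunk_size : Int) (context_size : Int) (out : List String) : Decidable (Spec_get_seq_chunks_py seq chunk_size context_size out) := by unfold Spec_get_seq_chunks_py; infer_instance

-- ===== CLAIM (what is proved, stated in full; the proofs are below) =====
def Claim_equal_get_seq_chunks_py : Prop := ∀ (seq : String) (chunk_size : Int) (context_size : Int), Dom_get_seq_chunks_py seq chunk_size context_size → Pre_get_seq_chunks_py seq chunk_size context_size → Spec_get_seq_chunks_py seq chunk_size context_size (get_seq_chunks_py seq chunk_size context_size)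

-- ===== LEMMAS AND PROOFS =====

-- Python's range(0, b, step) is empty for a negative step and 0 ≤ b.
theorem pyRange_empty_of_neg_step (b s : Int) (hb : 0 ≤ b) (hs : s < 0) :
    PySem.List.pyRange 0 b s = [] := by
  unfold PySem.List.pyRange
  rw [if_neg (by omega : ¬ s = 0)]
  rw [if_neg (by omega : ¬ 0 < s), if_neg (by omega : ¬ b < 0)]
  simp

-- Core list identity (Nat indices): a clamped window of the pre-padded list equals
-- A's three-piece assembly left-padding ++ middle slice ++ right-padding.
theorem chunk_eq (s : List Char) (p i m : Nat) (him : i < m) (hmn : m ≤ s.length) :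
    ((List.replicate p 'N' ++ s ++ List.replicate p 'N').drop i).take (m + 2 * p - i)
      = List.replicate (p - i) 'N'
        ++ ((s.drop (i - p)).take (min (m + p) s.length - (i - p))
        ++ List.replicate (m + p - s.length) 'N') := by
  rw [List.append_assoc]
  rw [List.drop_append, List.drop_replicate, List.length_replicate, List.drop_append,
      List.take_append, List.take_replicate, List.length_replicate, List.take_append,
      List.length_drop]
  have hip : i - p - s.length = 0 := by omega
  rw [hip, List.drop_zero, List.take_replicate]
  congr 1
  · congr 1; omega
  congr 1
  · rw [List.take_eq_take_iff, List.length_drop]; omega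
  · congr 1; omega

-- The same identity at the Int level, in exactly the shape of the two loop bodies.
theorem body_eq (s : List Char) (pad i m : Int) (hp : 0 ≤ pad) (hi : 0 ≤ i)
    (him : i < m) (hmn : m ≤ PySem.List.len s) :
    (if i - pad < 0 then PySem.List.pyRepeat ['N'] (-(i - pad)) else [])
      ++ PySem.List.slice s (some (if i - pad < 0 then 0 else i - pad))
           (some (if PySem.List.len s < m + pad then PySem.List.len s else m + pad))
      ++ (if PySem.List.len s < m + pad then PySem.List.pyRepeat ['N'] (m + pad - PySem.List.len s) else [])
    = PySem.List.slice (PySem.List.pyRepeat ['N'] pad ++ s ++ PySem.List.pyRepeat ['N'] pad)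
        (some i) (some (m + 2 * pad)) := by
  have hn : PySem.List.len s = (s.length : Int) := PySem.List.len_eq s
  rw [hn] at hmn ⊢
  simp only [PySem.List.pyRepeat_singleton]
  rw [PySem.List.slice_toNat _ hi (by omega)]
  have hT : (m + 2 * pad).toNat - i.toNat = m.toNat + 2 * pad.toNat - i.toNat := by omega
  rw [hT, chunk_eq s pad.toNat i.toNat m.toNat (by omega) (by omega)]
  split_ifs with h1 h2 h2
  · rw [PySem.List.slice_toNat _ (by omega) (by omega), List.append_assoc,
        show ((0:Int)).toNat = i.toNat - pad.toNat from by omega]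
    congr 1
    · congr 1; omega
    congr 1
    · rw [List.take_eq_take_iff, List.length_drop]; omega
    · congr 1; omega
  · rw [PySem.List.slice_toNat _ (by omega) (by omega), List.append_assoc,
        show ((0:Int)).toNat = i.toNat - pad.toNat from by omega]
    congr 1
    · congr 1; omega
    congr 1
    · rw [List.take_eq_take_iff, List.length_drop]; omega
    · symm; simp [show m.toNat + pad.toNat - s.length = 0 from by omega]
  · rw [PySem.List.slice_toNat _ (by omega) (by omega), List.append_assoc,
        show (i - pad).toNat = i.toNat - pad.toNat from by omega]
    congr 1
    · symm; simp [show pad.toNat - i.toNat = 0 from by omega]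
    congr 1
    · rw [List.take_eq_take_iff, List.length_drop]; omega
    · congr 1; omega
  · rw [PySem.List.slice_toNat _ (by omega) (by omega), List.append_assoc,
        show (i - pad).toNat = i.toNat - pad.toNat from by omega]
    congr 1
    · symm; simp [show pad.toNat - i.toNat = 0 from by omega]
    congr 1
    · rw [List.take_eq_take_iff, List.length_drop]; omega
    · symm; simp [show m.toNat + pad.toNat - s.length = 0 from by omega]

-- ===== VERDICT (by name: the statement is the Claim_ definition above) =====
theorem get_seq_chunks_py_spec : Claim_equal_get_seq_chunks_py := by
  intro seq cs ctx _ hpre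
  obtain ⟨hcs, hctx'⟩ := hpre
  unfold Spec_get_seq_chunks_py get_seq_chunks_py get_seq_chunks_py_alt
  dsimp only
  cases hE : (PySem.List.pyRange 0 (PySem.List.len seq.toList) cs).isEmpty with
  | true =>
    rw [List.isEmpty_iff] at hE
    rw [hE]
    simp
  | false =>
    rw [if_neg (by simp)]
    have hpos : 0 < cs := by
      rcases lt_or_gt_of_ne hcs with hneg | hpos
      · exfalso
        rw [pyRange_empty_of_neg_step _ _ (by rw [PySem.List.len_eq]; exact Int.natCast_nonneg _) hneg] at hE
        simp at hE
      · exact hpos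
    have hctx : 0 ≤ ctx := by
      rcases hctx' with h | h | h
      · exact h
      · omega
      · exfalso
        rw [h] at hE
        have hnil : PySem.List.pyRange 0 (PySem.List.len ("".toList)) cs = [] := by
          unfold PySem.List.pyRange
          rw [if_neg hcs]
          have h0 : PySem.List.len ("".toList) = 0 := rfl
          rw [h0]
          split_ifs <;> simp_all
        rw [hnil] at hE
        simp at hE
    have hpad : 0 ≤ PySem.Int.floordiv ctx 2 := Int.fdiv_nonneg hctx (by norm_num)
    refine List.map_congr_left ?_
    intro i hi
    rw [PySem.List.mem_pyRange_iff_of_pos hpos] at hi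
    obtain ⟨hi0, hin, -⟩ := hi
    have hlen : PySem.List.len seq.toList = (seq.toList.length : Int) := PySem.List.len_eq _
    rw [hlen] at hin
    have hm1 : i < min (i + cs) (PySem.List.len seq.toList) := by
      rw [hlen, lt_min_iff]; constructor <;> omega
    have hm2 : min (i + cs) (PySem.List.len seq.toList) ≤ PySem.List.len seq.toList := min_le_right _ _
    exact congrArg String.ofList
      (body_eq seq.toList (PySem.Int.floordiv ctx 2) i (min (i + cs) (PySem.List.len seq.toList)) hpad hi0 hm1 hm2)
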